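-- pv_equiv track=rewrite | github.com/ngonhatanhly-NNA/2526_COM1050_2 | Leetcode/2559_Leetcode.py | vowelStrings
-- ===== SOURCE A (Python) =====
-- from typing import List
--
-- def vowelStrings(words: List[int], queries: List[List[int]]) -> List[int]:
--     n = len(words)
--     # O(n)
--     prefix = [0] * (n + 1)
--     vowel = 'ueoai'
--
--     for i in range (n):
--         is_valid = 1 if (words[i][0] in vowel and words[i][-1] in vowel) else 0
--
--         prefix[i + 1] = prefix[i] + is_valid
--
--     res = []
--     for start, end in queries:
--         res.append(prefix[end + 1] - prefix[start])
--
--     return res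
-- ===== SOURCE B (Python) =====
-- def vowelStrings(words, queries):
--     vowels = set('aeiou')
--     valid = [1 if w[0] in vowels and w[-1] in vowels else 0 for w in words]
--     return [sum(valid[i] for i in range(s, e + 1)) for s, e in queries]
-- ===== Notes on version B (the rewrite author's own statement) =====
-- stated objective: alternative
-- what changed: Replaces the prefix-sum table with O(1) subtraction per query by a per-word validity flag list that is re-scanned and summed over each query's index range.
-- outside the precondition, e.g. on vowelStrings(['ae'], [[-1, 0]]): A returns [0], B returns [2]; on vowelStrings(['ae'], [[1, 0]]): A returns [0], B returns [0]
import Mathlib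
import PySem

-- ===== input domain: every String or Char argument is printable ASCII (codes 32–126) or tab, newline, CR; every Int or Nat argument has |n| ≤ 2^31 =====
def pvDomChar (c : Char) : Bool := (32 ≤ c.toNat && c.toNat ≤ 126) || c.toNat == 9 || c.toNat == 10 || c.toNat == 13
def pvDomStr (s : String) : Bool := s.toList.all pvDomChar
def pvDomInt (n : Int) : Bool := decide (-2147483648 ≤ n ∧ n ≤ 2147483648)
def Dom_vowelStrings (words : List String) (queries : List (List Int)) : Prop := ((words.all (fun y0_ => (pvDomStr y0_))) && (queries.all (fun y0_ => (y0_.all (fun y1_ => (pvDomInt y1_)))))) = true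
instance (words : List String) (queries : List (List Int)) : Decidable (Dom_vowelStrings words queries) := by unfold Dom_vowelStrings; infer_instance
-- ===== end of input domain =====

-- B replaces A's prefix-sum table (O(1) subtraction per query) by a per-word flag list whose query slice is summed afresh per query.

-- ===== PORT A =====
-- `c in 'ueoai'` applied to words[i][0] / words[i][-1]; none = IndexError on an empty word, excluded by Pre_
def pvAInVowel (oc : Option Char) : Bool :=
  match oc with
  | some c => ("ueoai".toList).contains c
  | none => false

def vowelStrings (words : List String) (queries : List (List Int)) : List Int :=
  let n : Nat := words.length
  -- prefix = [0] * (n + 1); for i in range(n): prefix[i+1] = prefix[i] + is_valid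
  let prefixL : List Int :=
    (PySem.List.pyRange 0 (n : Int) 1).foldl
      (fun pre i =>
        let w : String := (PySem.List.pyGet? words i).getD ""   -- i ∈ range(n): always in range
        let isValid : Int :=
          if pvAInVowel (PySem.Str.pyGet? w 0) && pvAInVowel (PySem.Str.pyGet? w (-1)) then 1 else 0
        pre.set (i + 1).toNat (PySem.List.pyGetD pre i 0 + isValid))
      (List.replicate (n + 1) 0)
  -- res = []; for start, end in queries: res.append(prefix[end+1] - prefix[start])
  queries.foldl
    (fun res q =>
      res ++ [match q with
              | [s, e] => PySem.List.pyGetD prefixL (e + 1) 0 - PySem.List.pyGetD prefixL s 0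
              | _ => 0])   -- unpacking raises ValueError unless len(q) == 2; excluded by Pre_
    []

-- ===== PORT B =====
-- vowels = set('aeiou')
def pvBVowelSet : List Char := PySem.Set.ofList ("aeiou".toList)

-- 1 if w[0] in vowels and w[-1] in vowels else 0
def pvBValid (w : String) : Int :=
  match PySem.Str.pyGet? w 0, PySem.Str.pyGet? w (-1) with
  | some a, some b => if pvBVowelSet.contains a && pvBVowelSet.contains b then 1 else 0
  | _, _ => 0   -- IndexError on an empty word, excluded by Pre_

def vowelStrings_alt (words : List String) (queries : List (List Int)) : List Int :=
  let valid : List Int := words.map pvBValid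
  queries.map (fun q =>
    -- `for s, e in queries` unpacks a 2-element query (ValueError otherwise; excluded by Pre_)
    if q.length = 2 then
      -- sum(valid[i] for i in range(s, e + 1)); valid[i] out of range = IndexError, excluded by Pre_
      ((PySem.List.pyRange (q.getD 0 0) (q.getD 1 0 + 1) 1).map
        (fun i => PySem.List.pyGetD valid i 0)).sum
    else 0)

-- ===== PRECONDITION & SPEC =====
-- Pre_ excludes empty-string words (A raises IndexError) and queries that are not 2-element lists
-- (A raises ValueError on unpacking), and restricts each query [s, e] to the problem's natural
-- domain 0 ≤ s ≤ e < len(words): outside it A still returns values, but they come from Python's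
-- negative-index wraparound on the prefix table / reversed prefix differences — accidental
-- artefacts of A's implementation, not part of the task.
def Pre_vowelStrings (words : List String) (queries : List (List Int)) : Prop :=
  (∀ w ∈ words, w ≠ "") ∧
  (∀ q ∈ queries, q.length = 2 ∧ 0 ≤ q.getD 0 0 ∧ q.getD 0 0 ≤ q.getD 1 0 ∧ q.getD 1 0 < (words.length : Int))
instance (words : List String) (queries : List (List Int)) : Decidable (Pre_vowelStrings words queries) := by unfold Pre_vowelStrings; infer_instance

def pvWitness_vowelStrings : List String × List (List Int) := (["apa", "oko", "xe"], [[0, 1], [1, 2], [2, 2]])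

def Spec_vowelStrings (words : List String) (queries : List (List Int)) (out : List Int) : Prop := out = vowelStrings_alt words queries
instance (words : List String) (queries : List (List Int)) (out : List Int) : Decidable (Spec_vowelStrings words queries out) := by unfold Spec_vowelStrings; infer_instance

-- ===== CLAIM (what is proved, stated in full; the proofs are below) =====
def Claim_equal_vowelStrings : Prop := ∀ (words : List String) (queries : List (List Int)), Dom_vowelStrings words queries → Pre_vowelStrings words queries → Spec_vowelStrings words queries (vowelStrings words queries)

-- ===== LEMMAS AND PROOFS =====

-- A's per-word 0/1 test (`in 'ueoai'`) agrees with B's (`in set('aeiou')`)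
theorem pvValid_agree (w : String) :
    (if pvAInVowel (PySem.Str.pyGet? w 0) && pvAInVowel (PySem.Str.pyGet? w (-1)) then (1:Int) else 0)
      = pvBValid w := by
  have hq : pvBVowelSet = ['a','e','i','o','u'] := by decide
  unfold pvBValid pvAInVowel
  cases h0 : PySem.Str.pyGet? w 0 <;> cases h1 : PySem.Str.pyGet? w (-1) <;> simp [hq]
  exact if_congr (by tauto) rfl rfl

-- after m iterations A's prefix table holds the partial sums of B's flag list, padded with zeros
theorem pvPrefix_partial (words : List String) (m : Nat) (hm : m ≤ words.length) :
    (PySem.List.pyRange 0 (m : Int) 1).foldl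
      (fun pre i =>
        let w : String := (PySem.List.pyGet? words i).getD ""
        let isValid : Int :=
          if pvAInVowel (PySem.Str.pyGet? w 0) && pvAInVowel (PySem.Str.pyGet? w (-1)) then 1 else 0
        pre.set (i + 1).toNat (PySem.List.pyGetD pre i 0 + isValid))
      (List.replicate (words.length + 1) 0)
    = (List.range (m + 1)).map (fun k => ((words.map pvBValid).take k).sum)
      ++ List.replicate (words.length - m) 0 := by
  induction m with
  | zero =>
      simp [PySem.List.pyRange_one_eq_nil, List.replicate_succ]
  | succ m ih =>
      have hm' : m ≤ words.length := Nat.le_of_succ_le hm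
      have hsplit : PySem.List.pyRange 0 ((m+1 : Nat) : Int) 1
          = PySem.List.pyRange 0 (m : Int) 1 ++ [(m : Int)] := by
        push_cast
        exact PySem.List.pyRange_one_succ_right (by positivity)
      rw [hsplit, List.foldl_append, ih hm']
      simp only [List.foldl_cons, List.foldl_nil]
      set f : Nat → Int := fun k => ((words.map pvBValid).take k).sum with hf
      have hlen : ((List.range (m + 1)).map f).length = m + 1 := by simp
      have hw : (PySem.List.pyGet? words (m : Int)).getD "" = words[m] := by
        rw [PySem.List.pyGet?_natCast, List.getElem?_eq_getElem (by omega : m < words.length)]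
        rfl
      have hread : PySem.List.pyGetD ((List.range (m + 1)).map f ++ List.replicate (words.length - m) 0) (m : Int) 0 = f m := by
        rw [PySem.List.pyGetD_natCast]
        rw [List.getD_eq_getElem?_getD, List.getElem?_append_left (by simp)]
        simp
      have htn : ((m : Int) + 1).toNat = m + 1 := by omega
      rw [hw, hread, htn, pvValid_agree]
      have hrep : List.replicate (words.length - m) (0:Int) = 0 :: List.replicate (words.length - (m+1)) 0 := by
        have h9 : words.length - m = (words.length - (m+1)) + 1 := by omega
        rw [h9, List.replicate_succ]
      rw [hrep]
      rw [show m + 1 = ((List.range (m + 1)).map f).length from hlen.symm, List.set_append]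
      simp only [hlen, lt_irrefl, Nat.sub_self, List.set_cons_zero, if_false]
      have hm2 : m < (List.map pvBValid words).length := by simp; omega
      have hfm : f m + pvBValid words[m] = f (m + 1) := by
        show (List.take m (List.map pvBValid words)).sum + pvBValid words[m]
            = (List.take (m+1) (List.map pvBValid words)).sum
        rw [List.sum_take_succ _ m hm2, List.getElem_map]
        rfl
      rw [hfm]
      simp [List.range_succ]

-- summing B's flag list over range(a, b) is a difference of its partial sums
theorem pvSum_range (l : List Int) (a b : Nat) (hab : a ≤ b) (hb : b ≤ l.length) :
    ((PySem.List.pyRange (a : Int) (b : Int) 1).map (fun i => PySem.List.pyGetD l i 0)).sum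
      = (l.take b).sum - (l.take a).sum := by
  induction b, hab using Nat.le_induction with
  | base => simp [PySem.List.pyRange_one_eq_nil]
  | succ b hab ih =>
      have hb' : b < l.length := by omega
      have hsplit : PySem.List.pyRange (a : Int) ((b + 1 : Nat) : Int) 1
          = PySem.List.pyRange (a : Int) (b : Int) 1 ++ [(b : Int)] := by
        push_cast
        exact PySem.List.pyRange_one_succ_right (by exact_mod_cast hab)
      rw [hsplit, List.map_append, List.sum_append, ih (by omega)]
      have hgb : PySem.List.pyGetD l (b : Int) 0 = l[b] := by
        rw [PySem.List.pyGetD_natCast, List.getD_eq_getElem?_getD,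
          List.getElem?_eq_getElem hb']
        rfl
      rw [List.sum_take_succ _ b hb']
      simp [hgb]
      ring

-- ===== VERDICT (by name: the statement is the Claim_ definition above) =====
theorem vowelStrings_spec : Claim_equal_vowelStrings := by
  intro words queries _ hpre
  obtain ⟨-, hq⟩ := hpre
  unfold Spec_vowelStrings vowelStrings vowelStrings_alt
  simp only []
  rw [PySem.List.foldl_append_singleton_eq_map, List.nil_append]
  apply List.map_congr_left
  intro q hqmem
  obtain ⟨hlen, hs0, hse, hen⟩ := hq q hqmem
  obtain ⟨s, e, rfl⟩ : ∃ s e, q = [s, e] := by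
    match q, hlen with
    | [s, e], _ => exact ⟨s, e, rfl⟩
  dsimp only
  rw [if_pos (show ([s, e] : List Int).length = 2 from rfl)]
  simp only [List.getD_cons_zero, List.getD_cons_succ] at hs0 hse hen ⊢
  have he0 : 0 ≤ e := le_trans hs0 hse
  have hpr := pvPrefix_partial words words.length le_rfl
  simp only [Nat.sub_self, List.replicate_zero, List.append_nil] at hpr
  rw [hpr]
  obtain ⟨sn, rfl⟩ : ∃ sn : Nat, s = (sn : Int) := ⟨s.toNat, (Int.toNat_of_nonneg hs0).symm⟩
  obtain ⟨en, rfl⟩ : ∃ en : Nat, e = (en : Int) := ⟨e.toNat, (Int.toNat_of_nonneg he0).symm⟩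
  have hsn : sn ≤ en := by exact_mod_cast hse
  have hen' : en < words.length := by exact_mod_cast hen
  have hget : ∀ k : Nat, k ≤ words.length →
      PySem.List.pyGetD ((List.range (words.length + 1)).map (fun k => ((words.map pvBValid).take k).sum)) (k : Int) 0
        = ((words.map pvBValid).take k).sum := by
    intro k hk
    rw [PySem.List.pyGetD_natCast, List.getD_eq_getElem?_getD, List.getElem?_map,
      List.getElem?_range (by omega)]
    rfl
  have h1 : ((en : Int) + 1) = ((en + 1 : Nat) : Int) := by push_cast; ring
  rw [h1, hget (en + 1) (by omega), hget sn (by omega)]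
  rw [pvSum_range (words.map pvBValid) sn (en + 1) (by omega) (by simp; omega)]
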